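-- pv_equiv track=rewrite | github.com/rubicco/Video-Part-Recommender | flask_module/search.py | search_in_keywords
-- ===== SOURCE A (Python) =====
-- def search_in_keywords(wanted, keyword_list):
--     wanted_keywords = wanted.split(' ')
--     count = 0
--     for keyword in keyword_list:
--         for wk in wanted_keywords:
--             if not (wk == 'of' or wk == 'and' or wk == 'but' or wk == 'or' or wk == 'nor' or wk == 'so' or wk == 'for' or wk == 'yet'):
--                 if(wk == keyword):
--                     count += 1
--     return count
-- ===== SOURCE B (Python) =====
-- def search_in_keywords(wanted, keyword_list):
--     stop = {'of', 'and', 'but', 'or', 'nor', 'so', 'for', 'yet'}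
--     counts = {}
--     for wk in wanted.split(' '):
--         if wk not in stop:
--             counts[wk] = counts.get(wk, 0) + 1
--     total = 0
--     for kw in keyword_list:
--         total += counts.get(kw, 0)
--     return total
-- ===== Notes on version B (the rewrite author's own statement) =====
-- stated objective: alternative
-- what changed: Replaces the nested scan of wanted words per keyword with a dict of filtered wanted-word counts built once, then one lookup per keyword.
import Mathlib
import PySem

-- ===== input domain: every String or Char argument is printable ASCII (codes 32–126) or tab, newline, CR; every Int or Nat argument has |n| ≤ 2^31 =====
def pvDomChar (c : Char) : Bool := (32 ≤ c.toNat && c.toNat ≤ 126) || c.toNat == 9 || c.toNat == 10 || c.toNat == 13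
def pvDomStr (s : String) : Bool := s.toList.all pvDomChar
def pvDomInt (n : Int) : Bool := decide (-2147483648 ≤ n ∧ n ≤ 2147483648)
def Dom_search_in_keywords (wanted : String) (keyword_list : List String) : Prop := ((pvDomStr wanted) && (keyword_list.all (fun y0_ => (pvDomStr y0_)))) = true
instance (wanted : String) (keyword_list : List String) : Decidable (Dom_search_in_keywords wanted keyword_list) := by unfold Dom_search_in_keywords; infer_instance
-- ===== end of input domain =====

-- B builds a dict of filtered wanted-word counts once and sums one lookup per keyword, instead of A's nested scan per keyword (alternative algorithm; not measured faster).
-- ===== PORT A =====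
def search_in_keywords (wanted : String) (keyword_list : List String) : Int :=
  let wanted_keywords := (PySem.Str.split? wanted " ").getD []
  keyword_list.foldl (fun count keyword =>
    wanted_keywords.foldl (fun count wk =>
      if !(wk == "of" || wk == "and" || wk == "but" || wk == "or" || wk == "nor" || wk == "so" || wk == "for" || wk == "yet") then
        (if wk == keyword then count + 1 else count)
      else count) count) 0

-- ===== PORT B =====
def search_in_keywords_alt (wanted : String) (keyword_list : List String) : Int :=
  let stop : PySem.Set String := PySem.Set.ofList ["of", "and", "but", "or", "nor", "so", "for", "yet"]
  let counts : PySem.Dict String Int :=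
    ((PySem.Str.split? wanted " ").getD []).foldl
      (fun d wk => if !(PySem.Set.contains stop wk) then d.insert wk (d.getD wk 0 + 1) else d)
      PySem.Dict.empty
  keyword_list.foldl (fun total kw => total + counts.getD kw 0) 0

-- ===== PRECONDITION & SPEC =====
def Spec_search_in_keywords (wanted : String) (keyword_list : List String) (out : Int) : Prop := out = search_in_keywords_alt wanted keyword_list
instance (wanted : String) (keyword_list : List String) (out : Int) : Decidable (Spec_search_in_keywords wanted keyword_list out) := by unfold Spec_search_in_keywords; infer_instance

-- ===== CLAIM (what is proved, stated in full; the proofs are below) =====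
def Claim_equal_search_in_keywords : Prop := ∀ (wanted : String) (keyword_list : List String), Dom_search_in_keywords wanted keyword_list → Spec_search_in_keywords wanted keyword_list (search_in_keywords wanted keyword_list)

-- ===== LEMMAS AND PROOFS =====

-- a loop that skips elements failing p is a loop over the filtered list
theorem pv_foldl_skip {α β : Type} (p : α → Bool) (f : β → α → β) :
    ∀ (l : List α) (init : β),
      l.foldl (fun d x => if p x then f d x else d) init = (l.filter p).foldl f init := by
  intro l
  induction l with
  | nil => intro init; rfl
  | cons x xs ih =>
    intro init
    by_cases h : p x = true <;> simp [List.foldl_cons, h, ih]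

-- ===== VERDICT (by name: the statement is the Claim_ definition above) =====
theorem search_in_keywords_spec : Claim_equal_search_in_keywords := by
  intro wanted keyword_list _
  unfold Spec_search_in_keywords search_in_keywords search_in_keywords_alt
  simp only []
  set ws := (PySem.Str.split? wanted " ").getD [] with hws
  set p := fun wk : String =>
    !(wk == "of" || wk == "and" || wk == "but" || wk == "or" || wk == "nor" || wk == "so" || wk == "for" || wk == "yet") with hp
  have hstop : ∀ wk : String,
      (!(PySem.Set.contains (PySem.Set.ofList ["of", "and", "but", "or", "nor", "so", "for", "yet"]) wk)) = p wk := by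
    intro wk
    simp [PySem.Set.contains, PySem.Set.ofList, PySem.Set.add, PySem.Set.empty, hp, Bool.and_assoc, Bool.beq_eq_decide_eq]
  -- B side: the dict built by the skipping loop is the counter of the filtered words
  have hdict :
      ws.foldl (fun d wk => if !(PySem.Set.contains (PySem.Set.ofList ["of", "and", "but", "or", "nor", "so", "for", "yet"]) wk)
                  then d.insert wk (d.getD wk 0 + 1) else d) PySem.Dict.empty
        = PySem.Dict.counter (ws.filter p) := by
    simp only [hstop]
    exact (pv_foldl_skip p (fun (d : PySem.Dict String Int) (wk : String) => d.insert wk (d.getD wk 0 + 1))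
        ws PySem.Dict.empty).trans (PySem.Dict.foldl_insert_getD_add_one_eq_counter (ws.filter p))
  rw [hdict]
  -- A side: the inner scan over ws adds the filtered count of the keyword
  have hA : (fun (count : Int) (keyword : String) =>
        ws.foldl (fun count wk => if p wk then (if wk == keyword then count + 1 else count) else count) count)
      = fun (count : Int) (keyword : String) => count + ((ws.filter p).count keyword : Int) := by
    funext c kw
    rw [pv_foldl_skip p (fun (count : Int) (wk : String) => if wk == kw then count + 1 else count) ws c]
    exact PySem.List.foldl_beq_add_one (ws.filter p) kw c
  rw [hA]
  simp only [PySem.Dict.getD_counter]
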